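-- pv_equiv track=rewrite | github.com/xhDeng19/2023-2024-Fall-Introduction-to-the-Computing-Theory | 11.21_Homework_3_dxh.py | IsGreater
-- ===== SOURCE A (Python) =====
-- def IsGreater(str1, str2): #判断前一个整数字符串是否大于于后一个整数字符串
--     if len(str1) > len(str2):
--         return True
--     if len(str1) < len(str2):
--         return False
--     if len(str1) == len(str2):
--         for i in range(len(str1)):
--             if str1[i] > str2[i]: #第一次出现前数比后数大的一位
--                 return True
--             elif str1[i] < str2[i]: #第一次出现前数比后数小的一位
--                 return False
--         return False #两个数相等
-- ===== SOURCE B (Python) =====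
-- def IsGreater(str1, str2):
--     # Right-to-left full pass with an accumulator: the last differing pair seen
--     # (scanning backwards) is the most significant differing digit, which decides.
--     if len(str1) != len(str2):
--         return len(str1) > len(str2)
--     verdict = False
--     for a, b in zip(reversed(str1), reversed(str2)):
--         if a != b:
--             verdict = a > b
--     return verdict
-- ===== Notes on version B (the rewrite author's own statement) =====
-- stated objective: alternative
-- what changed: Replaces A's left-to-right early-exit digit loop with a single right-to-left full pass keeping an accumulator (the last difference seen scanning backwards, i.e. the most significant one, decides); length mismatch is handled by one arithmetic comparison.
import Mathlib
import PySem

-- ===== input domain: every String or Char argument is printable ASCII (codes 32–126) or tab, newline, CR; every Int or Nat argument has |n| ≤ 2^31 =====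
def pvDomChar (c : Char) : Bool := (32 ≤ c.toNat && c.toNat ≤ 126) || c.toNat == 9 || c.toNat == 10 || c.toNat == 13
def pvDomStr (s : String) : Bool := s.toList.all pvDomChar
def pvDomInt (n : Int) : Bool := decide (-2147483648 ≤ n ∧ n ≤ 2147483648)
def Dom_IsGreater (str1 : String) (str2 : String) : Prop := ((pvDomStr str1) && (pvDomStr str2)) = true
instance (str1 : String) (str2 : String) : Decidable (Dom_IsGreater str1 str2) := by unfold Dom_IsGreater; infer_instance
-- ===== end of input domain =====

-- B replaces A's left-to-right early-exit digit loop with one right-to-left full pass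
-- keeping an accumulator (the last difference seen backwards decides); objective: alternative.

-- ===== PORT A =====
-- A's for-loop over i in range(len(str1)) (lengths equal in that branch): structural
-- recursion over both character lists in lock-step, same early returns in the same order.
def IsGreaterLoop : List Char → List Char → Bool
  | c1 :: t1, c2 :: t2 =>
    if c1 > c2 then true
    else if c1 < c2 then false
    else IsGreaterLoop t1 t2
  | _, _ => false  -- loop finished without returning: "两个数相等" → False

def IsGreater (str1 : String) (str2 : String) : Bool :=
  if PySem.Str.len str1 > PySem.Str.len str2 then true
  else if PySem.Str.len str1 < PySem.Str.len str2 then false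
  else IsGreaterLoop str1.toList str2.toList

-- ===== PORT B =====
-- Source B: length mismatch decided arithmetically; otherwise a foldl over the zipped
-- REVERSED strings, updating the verdict wherever the characters differ.
def IsGreater_alt (str1 : String) (str2 : String) : Bool :=
  if str1.toList.length ≠ str2.toList.length then
    decide (str1.toList.length > str2.toList.length)
  else
    (List.zip str1.toList.reverse str2.toList.reverse).foldl
      (fun verdict p => if p.1 ≠ p.2 then decide (p.1 > p.2) else verdict) false

-- ===== PRECONDITION & SPEC =====
def Spec_IsGreater (str1 : String) (str2 : String) (out : Bool) : Prop := out = IsGreater_alt str1 str2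
instance (str1 : String) (str2 : String) (out : Bool) : Decidable (Spec_IsGreater str1 str2 out) := by unfold Spec_IsGreater; infer_instance

-- ===== CLAIM =====
def Claim_equal_IsGreater : Prop := ∀ (str1 : String) (str2 : String), Dom_IsGreater str1 str2 → Spec_IsGreater str1 str2 (IsGreater str1 str2)

-- ===== LEMMAS AND PROOFS =====
theorem zip_reverse_eq (l1 l2 : List Char) (h : l1.length = l2.length) :
    List.zip l1.reverse l2.reverse = (List.zip l1 l2).reverse := by
  induction l1 generalizing l2 with
  | nil => cases l2 with
    | nil => simp
    | cons b bs => simp at h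
  | cons a as ih =>
    cases l2 with
    | nil => simp at h
    | cons b bs =>
      simp only [List.length_cons, Nat.add_right_cancel_iff] at h
      simp only [List.reverse_cons, List.zip_cons_cons, List.reverse_cons]
      rw [List.zip_append (by simp [h]), ih bs h]
      rfl

theorem loop_eq_foldr (l1 l2 : List Char) (h : l1.length = l2.length) :
    IsGreaterLoop l1 l2 =
      (List.zip l1 l2).foldr
        (fun p verdict => if p.1 ≠ p.2 then decide (p.1 > p.2) else verdict) false := by
  induction l1 generalizing l2 with
  | nil => cases l2 <;> simp [IsGreaterLoop] at h ⊢
  | cons a as ih =>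
    cases l2 with
    | nil => simp at h
    | cons b bs =>
      simp only [List.length_cons, Nat.add_right_cancel_iff] at h
      simp only [IsGreaterLoop, List.zip_cons_cons, List.foldr_cons]
      rcases lt_trichotomy a b with hlt | heq | hgt
      · simp [hlt, not_lt_of_gt hlt, ne_of_lt hlt]
      · subst heq; simp [ih bs h]
      · simp [hgt, not_lt_of_gt hgt, (ne_of_lt hgt).symm]

-- ===== VERDICT =====
theorem IsGreater_spec : Claim_equal_IsGreater := by
  intro s1 s2 _
  unfold Spec_IsGreater IsGreater IsGreater_alt
  simp only [PySem.Str.len_eq]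
  rcases lt_trichotomy s1.toList.length s2.toList.length with h | h | h
  all_goals have h' := h; rw [String.length_toList, String.length_toList] at h'
  · simp [h', not_lt_of_gt h', Nat.ne_of_lt h']
  · simp [h', zip_reverse_eq _ _ h, List.foldl_reverse, loop_eq_foldr _ _ h]
  · simp [h', not_lt_of_gt h', (Nat.ne_of_lt h').symm]
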